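-- pv_equiv track=rewrite | github.com/kosy318/zogori_data_analysis | submission/02/201724472.py | find_same
-- ===== SOURCE A (Python) =====
-- def find_same(ss, tt, kk):
--   check = False
--   if ss == '' and len(tt[kk:])%2 != 0 :
--     return True
--   if len(ss) == 0:
--     return False
--   find_list = [n for n,e in enumerate(tt) if n > kk and ss[0] == e and (n-kk)%2 == 1]
--   if len(find_list) == 0:
--     return False
--   for k in find_list:
--     check |= find_same(ss[1:], tt, k)
--     if check == False:
--       return False
--   return check
-- ===== SOURCE B (Python) =====
-- def find_same(ss, tt, kk):
--     # Iterative greedy chain: A's result depends only on the first match at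
--     # each level, so follow that single chain, resuming the scan just past the
--     # previous match (positions strictly increase), in one pass over tt.
--     pos = kk
--     L = len(tt)
--     for c in ss:
--         n = pos + 1 if pos >= 0 else 0
--         while n < L and not (tt[n] == c and (n - pos) % 2 == 1):
--             n += 1
--         if n >= L:
--             return False
--         pos = n
--     return len(tt[pos:]) % 2 != 0
-- ===== Notes on version B (the rewrite author's own statement) =====
-- stated objective: faster
-- what changed: Replaced A's branching recursion over every matching index (whose result depends only on the first match at each level) with a single iterative greedy chain whose scan resumes just past the previous match, one pass over tt.
import Mathlib
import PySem

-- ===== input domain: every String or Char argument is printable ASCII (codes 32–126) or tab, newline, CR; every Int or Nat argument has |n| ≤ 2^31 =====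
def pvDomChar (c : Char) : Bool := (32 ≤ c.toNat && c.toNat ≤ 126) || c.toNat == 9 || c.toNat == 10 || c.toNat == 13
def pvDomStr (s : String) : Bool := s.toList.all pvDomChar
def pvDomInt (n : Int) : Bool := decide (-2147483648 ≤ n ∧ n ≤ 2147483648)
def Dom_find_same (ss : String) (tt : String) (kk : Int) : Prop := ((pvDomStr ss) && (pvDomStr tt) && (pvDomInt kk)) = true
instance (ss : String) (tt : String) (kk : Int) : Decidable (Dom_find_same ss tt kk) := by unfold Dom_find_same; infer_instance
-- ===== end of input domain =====

-- B replaces A's branching recursion over all matching indices by a single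
-- iterative greedy chain that resumes its scan just past the previous match.

-- ===== PORT A =====
-- the 'for k in find_list' loop with 'check |= …; if check == False: return False';
-- the recursive call is passed in as f
def findALoop (f : Int → Bool) : List Int → Bool → Bool
  | [], check => check
  | k :: rest, check =>
      let check := check || f k
      if check = false then false else findALoop f rest check

def findA : List Char → List Char → Int → Bool
  | [], tt, kk =>
      -- ss == '' : 'return True' if len(tt[kk:]) % 2 != 0, else falls to 'return False'
      decide ((PySem.List.slice tt (some kk) none).length % 2 ≠ 0)
  | c :: rest, tt, kk =>
      let find_list := ((PySem.List.enumerate tt).filter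
        (fun p => decide (kk < p.1 ∧ c = p.2 ∧ PySem.Int.mod (p.1 - kk) 2 = 1))).map (·.1)
      if find_list = [] then false
      else findALoop (fun k => findA rest tt k) find_list false
  termination_by ss => ss.length

def find_same (ss : String) (tt : String) (kk : Int) : Bool := findA ss.toList tt.toList kk

-- ===== PORT B =====
-- the inner 'while n < L and not (tt[n] == c and (n - pos) % 2 == 1): n += 1' loop,
-- together with the 'if n >= L: return False' test (none = no match found)
def findBScan (tt : List Char) (c : Char) (pos : Int) (n : Nat) : Option Nat :=
  if h : n < tt.length then
    if tt[n] = c ∧ PySem.Int.mod ((n : Int) - pos) 2 = 1 then some n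
    else findBScan tt c pos (n + 1)
  else none
  termination_by tt.length - n

def findB : List Char → List Char → Int → Bool
  | [], tt, pos => decide ((PySem.List.slice tt (some pos) none).length % 2 ≠ 0)
  | c :: rest, tt, pos =>
      -- n = pos + 1 if pos >= 0 else 0
      match findBScan tt c pos (if 0 ≤ pos then (pos + 1).toNat else 0) with
      | none => false
      | some n => findB rest tt (n : Int)

def find_same_alt (ss : String) (tt : String) (kk : Int) : Bool := findB ss.toList tt.toList kk

-- ===== PRECONDITION & SPEC =====
def Spec_find_same (ss : String) (tt : String) (kk : Int) (out : Bool) : Prop := out = find_same_alt ss tt kk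
instance (ss : String) (tt : String) (kk : Int) (out : Bool) : Decidable (Spec_find_same ss tt kk out) := by unfold Spec_find_same; infer_instance

-- ===== CLAIM (what is proved, stated in full; the proofs are below) =====
def Claim_equal_find_same : Prop := ∀ (ss : String) (tt : String) (kk : Int), Dom_find_same ss tt kk → Spec_find_same ss tt kk (find_same ss tt kk)

-- ===== LEMMAS AND PROOFS =====

-- the match predicate of A's comprehension, in B's orientation (e == c rewritten c == e)
def pP (c : Char) (pos : Int) (p : Int × Char) : Bool :=
  decide (pos < p.1 ∧ p.2 = c ∧ PySem.Int.mod (p.1 - pos) 2 = 1)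

theorem findALoop_true (f : Int → Bool) (ks : List Int) : findALoop f ks true = true := by
  induction ks with
  | nil => rfl
  | cons k rest ih => simp [findALoop, ih]

theorem findALoop_cons (f : Int → Bool) (k : Int) (ks : List Int) :
    findALoop f (k :: ks) false = f k := by
  rw [findALoop]
  cases h : f k with
  | false => simp
  | true => simp [findALoop_true]

theorem find?_eq_head?_filter {α : Type} (p : α → Bool) (l : List α) :
    l.find? p = (l.filter p).head? := by
  induction l with
  | nil => rfl
  | cons x xs ih =>
      simp only [List.find?_cons, List.filter_cons]
      by_cases h : p x = true
      · simp [h]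
      · simp only [Bool.not_eq_true] at h
        simp only [h]; exact ih

-- descending part of the scan/find? correspondence: from index n on, with pos < n,
-- B's resumed scan finds what A's comprehension finds
theorem scan_drop (tt : List Char) (c : Char) (pos : Int) :
    ∀ (k n : Nat), tt.length - n ≤ k → pos < (n : Int) →
      ((PySem.List.enumerate (tt.drop n) (n : Int)).find? (pP c pos)).map (·.1)
        = (findBScan tt c pos n).map (fun m => ((m : Nat) : Int)) := by
  intro k
  induction k with
  | zero =>
      intro n hk _
      have hn : tt.length ≤ n := by omega
      rw [List.drop_eq_nil_of_le hn, findBScan, dif_neg (by omega)]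
      simp [PySem.List.enumerate_nil]
  | succ k ih =>
      intro n hk hpos
      by_cases h : n < tt.length
      · rw [List.drop_eq_getElem_cons h, PySem.List.enumerate_cons, findBScan, dif_pos h]
        by_cases hm : tt[n] = c ∧ PySem.Int.mod ((n : Int) - pos) 2 = 1
        · have hp : pP c pos ((n : Int), tt[n]) = true := by
            simp only [pP, decide_eq_true_eq]
            exact ⟨hpos, hm.1, hm.2⟩
          rw [if_pos hm, List.find?_cons_of_pos hp]
          simp
        · have hp : pP c pos ((n : Int), tt[n]) = false := by
            simp only [pP, decide_eq_false_iff_not, not_and]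
            intro _ h1 h2
            exact hm ⟨h1, h2⟩
          rw [if_neg hm, List.find?_cons_of_neg (by simp [hp])]
          have := ih (n + 1) (by omega) (by push_cast; omega)
          simpa using this
      · have hn : tt.length ≤ n := by omega
        rw [List.drop_eq_nil_of_le hn, findBScan, dif_neg (by omega)]
        simp [PySem.List.enumerate_nil]

-- indices below B's starting point never satisfy A's 'n > kk' test
theorem prefix_none (tt : List Char) (c : Char) (pos : Int) (s : Nat)
    (hs : (s : Int) ≤ pos + 1) :
    (PySem.List.enumerate (tt.take s) 0).find? (pP c pos) = none := by
  rw [List.find?_eq_none]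
  intro p hp
  obtain ⟨j, hj, rfl⟩ := (PySem.List.mem_enumerate_iff _ _ _).mp hp
  have hjs : j < s := lt_of_lt_of_le hj (by simp)
  simp only [pP, decide_eq_true_eq, not_and]
  intro hlt
  exfalso
  omega

-- B's resumed scan computes exactly the first index of A's comprehension
theorem scan_eq_find? (tt : List Char) (c : Char) (pos : Int) :
    ((PySem.List.enumerate tt 0).find? (pP c pos)).map (·.1)
      = (findBScan tt c pos (if 0 ≤ pos then (pos + 1).toNat else 0)).map
          (fun m => ((m : Nat) : Int)) := by
  by_cases hneg : 0 ≤ pos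
  · rw [if_pos hneg]
    by_cases hs : (pos + 1).toNat ≤ tt.length
    · conv_lhs => rw [← List.take_append_drop (pos + 1).toNat tt]
      rw [PySem.List.enumerate_append, List.find?_append,
          prefix_none tt c pos (pos + 1).toNat (by omega), Option.none_or]
      have hlen : ((tt.take (pos + 1).toNat).length : Int) = ((pos + 1).toNat : Int) := by
        simp [List.length_take, Nat.min_eq_left hs]
      rw [zero_add, hlen]
      exact scan_drop tt c pos tt.length (pos + 1).toNat (by omega) (by omega)
    · rw [findBScan, dif_neg (by omega)]
      rw [List.find?_eq_none.mpr ?_]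
      · rfl
      · intro p hp
        obtain ⟨j, hj, rfl⟩ := (PySem.List.mem_enumerate_iff _ _ _).mp hp
        simp only [pP, decide_eq_true_eq, not_and]
        intro hlt
        exfalso
        omega
  · rw [if_neg hneg]
    have := scan_drop tt c pos tt.length 0 (by omega) (by omega)
    simpa using this

theorem findA_eq_findB (ss tt : List Char) (kk : Int) : findA ss tt kk = findB ss tt kk := by
  induction ss generalizing kk with
  | nil => rw [findA, findB]
  | cons c rest ih =>
      rw [findA, findB]
      have hpred : (fun p : Int × Char =>
            decide (kk < p.1 ∧ c = p.2 ∧ PySem.Int.mod (p.1 - kk) 2 = 1)) = pP c kk := by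
        funext p
        simp [pP, eq_comm]
      simp only [hpred]
      have hkey := scan_eq_find? tt c kk
      rw [find?_eq_head?_filter] at hkey
      cases hfl : (PySem.List.enumerate tt 0).filter (pP c kk) with
      | nil =>
          rw [hfl] at hkey
          simp only [List.head?_nil, Option.map_none] at hkey
          have hscan : findBScan tt c kk (if 0 ≤ kk then (kk + 1).toNat else 0) = none := by
            cases h : findBScan tt c kk (if 0 ≤ kk then (kk + 1).toNat else 0) with
            | none => rfl
            | some m => rw [h] at hkey; simp at hkey
          rw [hscan]
          simp
      | cons q qs =>
          rw [hfl] at hkey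
          simp only [List.head?_cons, Option.map_some] at hkey
          obtain ⟨m, hm, hmq⟩ : ∃ m, findBScan tt c kk (if 0 ≤ kk then (kk + 1).toNat else 0)
              = some m ∧ ((m : Nat) : Int) = q.1 := by
            cases h : findBScan tt c kk (if 0 ≤ kk then (kk + 1).toNat else 0) with
            | none => rw [h] at hkey; simp at hkey
            | some m =>
                rw [h] at hkey
                simp only [Option.map_some, Option.some.injEq] at hkey
                exact ⟨m, rfl, hkey.symm⟩
          rw [hm]
          simp only [List.map_cons]
          rw [if_neg (by simp)]
          rw [findALoop_cons]
          rw [hmq]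
          exact ih q.1

-- ===== VERDICT (by name: the statement is the Claim_ definition above) =====
theorem find_same_spec : Claim_equal_find_same := by
  intro ss tt kk _
  unfold Spec_find_same find_same find_same_alt
  exact findA_eq_findB _ _ _
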